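-- pv_equiv track=rewrite | github.com/ucjaiswal/scenescape | model_installer/src/generate_model_config.py | _classify_model_type
-- ===== SOURCE A (Python) =====
-- from typing import Dict, List, Tuple
--
-- def _classify_model_type(model_name: str) -> Tuple[str, str]:
--   """
--   Classify model type and return (model_type, metadata_policy).
--
--   Returns:
--     model_type: 'detect', 'inference', or 'classify'
--     metadata_policy: One of the policies from sscape_adapter.py
--   """
--   model_name_lower = model_name.lower()
--
--   # Detection models
--   if any(keyword in model_name_lower for keyword in [
--     'detection', 'detector', 'detect'
--   ]):
--     if 'text' in model_name_lower or 'horizontal-text' in model_name_lower: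
--       return 'detect', 'ocrPolicy'
--     else:
--       return 'detect', 'detectionPolicy'
--
--   # Re-identification models
--   elif 'reidentification' in model_name_lower or 'reid' in model_name_lower:
--     return 'inference', 'reidPolicy'
--
--   # Recognition/classification models
--   elif any(keyword in model_name_lower for keyword in [
--     'recognition', 'attributes', 'classification'
--   ]):
--     if 'text' in model_name_lower:
--       return 'classify', 'ocrPolicy'
--     else:
--       return 'classify', 'classificationPolicy'
--
--   # TODO: identify the correct policy for the pose estimation models
--   # Pose estimation
--   elif 'pose' in model_name_lower:
--     return 'inference', 'detection3DPolicy'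
--
--   # Default to detection with detectionPolicy
--   else:
--     return 'detect', 'detectionPolicy'
-- ===== SOURCE B (Python) =====
-- from typing import Dict, List, Tuple
--
-- # Ordered rule table: (keywords, default (type, policy), optional text-override (type, policy))
-- _RULES = [
--   (['detection', 'detector', 'detect'], ('detect', 'detectionPolicy'), ('detect', 'ocrPolicy')),
--   (['reidentification', 'reid'], ('inference', 'reidPolicy'), None),
--   (['recognition', 'attributes', 'classification'], ('classify', 'classificationPolicy'), ('classify', 'ocrPolicy')),
--   (['pose'], ('inference', 'detection3DPolicy'), None),
-- ]
--
-- def _classify_model_type(model_name: str) -> Tuple[str, str]: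
--   name = model_name.lower()
--   for keywords, default, text_override in _RULES:
--     if any(k in name for k in keywords):
--       if text_override is not None and 'text' in name:
--         return text_override
--       return default
--   return 'detect', 'detectionPolicy'
-- ===== Notes on version B (the rewrite author's own statement) =====
-- stated objective: simpler
-- what changed: Replaces the elif cascade by an ordered rule table (keywords, default result, optional text override) scanned with one first-match loop; the redundant 'horizontal-text' test (subsumed by 'text') is dropped.
import Mathlib
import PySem

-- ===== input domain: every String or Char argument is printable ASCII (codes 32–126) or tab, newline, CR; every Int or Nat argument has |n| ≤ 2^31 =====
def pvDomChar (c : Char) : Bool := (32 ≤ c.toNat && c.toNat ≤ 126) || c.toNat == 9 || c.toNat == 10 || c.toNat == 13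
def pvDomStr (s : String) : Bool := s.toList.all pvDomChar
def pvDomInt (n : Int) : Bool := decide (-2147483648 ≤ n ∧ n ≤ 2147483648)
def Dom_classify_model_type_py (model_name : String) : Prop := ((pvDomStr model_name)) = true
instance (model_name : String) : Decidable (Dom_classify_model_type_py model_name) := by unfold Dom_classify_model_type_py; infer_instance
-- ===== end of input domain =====

-- B replaces A's elif cascade by an ordered rule table scanned with one first-match loop (objective: simpler).


-- ===== PORT A =====
def classify_model_type_py (model_name : String) : String × String :=
  let model_name_lower := PySem.Str.lower model_name
  if ["detection", "detector", "detect"].any (fun k => PySem.Str.isIn k model_name_lower) then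
    if PySem.Str.isIn "text" model_name_lower || PySem.Str.isIn "horizontal-text" model_name_lower then
      ("detect", "ocrPolicy")
    else
      ("detect", "detectionPolicy")
  else if PySem.Str.isIn "reidentification" model_name_lower || PySem.Str.isIn "reid" model_name_lower then
    ("inference", "reidPolicy")
  else if ["recognition", "attributes", "classification"].any (fun k => PySem.Str.isIn k model_name_lower) then
    if PySem.Str.isIn "text" model_name_lower then
      ("classify", "ocrPolicy")
    else
      ("classify", "classificationPolicy")
  else if PySem.Str.isIn "pose" model_name_lower then
    ("inference", "detection3DPolicy")
  else
    ("detect", "detectionPolicy")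

-- ===== PORT B =====
-- ordered rule table: (keywords, default result, optional text-override result)
def classifyRules : List (List String × (String × String) × Option (String × String)) :=
  [ (["detection", "detector", "detect"], ("detect", "detectionPolicy"), some ("detect", "ocrPolicy")),
    (["reidentification", "reid"], ("inference", "reidPolicy"), none),
    (["recognition", "attributes", "classification"], ("classify", "classificationPolicy"), some ("classify", "ocrPolicy")),
    (["pose"], ("inference", "detection3DPolicy"), none) ]

-- first-match scan over the rule table
def matchRules (name : String) : List (List String × (String × String) × Option (String × String)) → String × String
  | [] => ("detect", "detectionPolicy")
  | (keywords, dflt, textOverride) :: rest =>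
    if keywords.any (fun k => PySem.Str.isIn k name) then
      match textOverride with
      | some t => if PySem.Str.isIn "text" name then t else dflt
      | none => dflt
    else matchRules name rest

def classify_model_type_py_alt (model_name : String) : String × String :=
  matchRules (PySem.Str.lower model_name) classifyRules

-- ===== PRECONDITION & SPEC =====
def Spec_classify_model_type_py (model_name : String) (out : String × String) : Prop := out = classify_model_type_py_alt model_name
instance (model_name : String) (out : String × String) : Decidable (Spec_classify_model_type_py model_name out) := by unfold Spec_classify_model_type_py; infer_instance

-- ===== CLAIM (what is proved, stated in full; the proofs are below) =====
def Claim_equal_classify_model_type_py : Prop := ∀ (model_name : String), Dom_classify_model_type_py model_name → Spec_classify_model_type_py model_name (classify_model_type_py model_name)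

-- ===== LEMMAS AND PROOFS =====

-- 'horizontal-text' in s implies 'text' in s (substring transitivity)
theorem text_of_horizontal_text (s : String) (h : PySem.Str.isIn "horizontal-text" s = true) :
    PySem.Str.isIn "text" s = true := by
  rw [PySem.Str.isIn_iff_infix] at h ⊢
  exact List.IsInfix.trans (by decide) h

-- ===== VERDICT (by name: the statement is the Claim_ definition above) =====
theorem classify_model_type_py_spec : Claim_equal_classify_model_type_py := by
  intro model_name _
  unfold Spec_classify_model_type_py classify_model_type_py classify_model_type_py_alt
    classifyRules
  simp only [List.any_cons, List.any_nil, Bool.or_false]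
  have key : (PySem.Str.isIn "text" (PySem.Str.lower model_name) ||
      PySem.Str.isIn "horizontal-text" (PySem.Str.lower model_name)) =
      PySem.Str.isIn "text" (PySem.Str.lower model_name) := by
    cases hh : PySem.Str.isIn "horizontal-text" (PySem.Str.lower model_name)
    · simp
    · have := text_of_horizontal_text _ hh
      rw [this]
      simp
  rw [key]
  split_ifs <;> simp_all [matchRules]
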